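-- pv_equiv track=rewrite | github.com/instant-results/scheduling-parallel-batch-jobs | Pitt_perm.py | get_machine_number_for_task
-- ===== SOURCE A (Python) =====
-- def get_machine_number_for_task(individual, task_position):
--     counter = 0
--     position_number = 0
--     for machine in individual[1]:
--         position_number += machine
--         if position_number >= task_position + 1:
--             return counter
--         else:
--             counter = counter + 1
--     return None
-- ===== SOURCE B (Python) =====
-- def _first_reach(ms, target):
--     # First index i with sum(ms[:i+1]) >= target, by divide and conquer; None if none.
--     n = len(ms)
--     if n == 0:
--         return None
--     if n == 1:
--         return 0 if ms[0] >= target else None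
--     mid = n // 2
--     left = _first_reach(ms[:mid], target)
--     if left is not None:
--         return left
--     right = _first_reach(ms[mid:], target - sum(ms[:mid]))
--     return None if right is None else mid + right
--
--
-- def get_machine_number_for_task(individual, task_position):
--     return _first_reach(individual[1], task_position + 1)
-- ===== Notes on version B (the rewrite author's own statement) =====
-- stated objective: alternative
-- what changed: Replaced the single-pass running-sum early-exit scan with a divide-and-conquer search: split the machine list in half, look for the crossing index in the left half, otherwise recurse on the right half with the target reduced by the left half's sum and offset the index by the split point.
import Mathlib
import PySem

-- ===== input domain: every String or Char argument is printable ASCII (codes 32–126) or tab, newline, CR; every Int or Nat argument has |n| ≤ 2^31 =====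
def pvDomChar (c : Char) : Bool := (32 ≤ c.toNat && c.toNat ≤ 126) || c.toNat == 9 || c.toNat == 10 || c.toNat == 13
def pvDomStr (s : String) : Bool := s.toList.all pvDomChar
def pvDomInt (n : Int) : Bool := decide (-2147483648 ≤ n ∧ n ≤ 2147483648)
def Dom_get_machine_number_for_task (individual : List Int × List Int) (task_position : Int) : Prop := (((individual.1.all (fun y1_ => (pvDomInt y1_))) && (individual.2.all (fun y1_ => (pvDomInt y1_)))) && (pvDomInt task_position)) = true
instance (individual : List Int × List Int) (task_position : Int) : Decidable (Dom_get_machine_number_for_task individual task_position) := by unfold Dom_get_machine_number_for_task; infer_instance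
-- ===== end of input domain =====

-- B replaces A's running-sum early-exit scan with a divide-and-conquer search over the machine list (alternative decomposition, not claimed faster).


-- ===== PORT A =====
-- A: running-sum scan with an explicit counter, early return on the first machine reaching the target.
def pvGoA : List Int → Int → Int → Int → Option Int
  | [], _, _, _ => none
  | m :: rest, t, counter, position_number =>
    if position_number + m ≥ t + 1 then some counter
    else pvGoA rest t (counter + 1) (position_number + m)

def get_machine_number_for_task (individual : List Int × List Int) (task_position : Int) : Option Int :=
  pvGoA individual.2 task_position 0 0

-- ===== PORT B =====
-- B: divide and conquer — try the left half, else the right half with the target reduced by the left half's sum.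
def pvFirstReach : List Int → Int → Option Int
  | [], _ => none
  | [m], target => if m ≥ target then some 0 else none
  | m1 :: m2 :: rest, target =>
    let ms := m1 :: m2 :: rest
    let mid := ms.length / 2
    match pvFirstReach (ms.take mid) target with
    | some i => some i
    | none =>
      match pvFirstReach (ms.drop mid) (target - (ms.take mid).sum) with
      | none => none
      | some r => some ((mid : Int) + r)
termination_by ms _ => ms.length
decreasing_by
  · simp; omega
  · simp; omega

def get_machine_number_for_task_alt (individual : List Int × List Int) (task_position : Int) : Option Int :=
  pvFirstReach individual.2 (task_position + 1)

-- ===== PRECONDITION & SPEC =====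
def Spec_get_machine_number_for_task (individual : List Int × List Int) (task_position : Int) (out : Option Int) : Prop := out = get_machine_number_for_task_alt individual task_position
instance (individual : List Int × List Int) (task_position : Int) (out : Option Int) : Decidable (Spec_get_machine_number_for_task individual task_position out) := by unfold Spec_get_machine_number_for_task; infer_instance

-- ===== CLAIM (what is proved, stated in full; the proofs are below) =====
def Claim_equal_get_machine_number_for_task : Prop := ∀ (individual : List Int × List Int) (task_position : Int), Dom_get_machine_number_for_task individual task_position → Spec_get_machine_number_for_task individual task_position (get_machine_number_for_task individual task_position)

-- ===== LEMMAS AND PROOFS =====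
-- Reference function: first index i with (m₀+…+mᵢ) ≥ target.
def pvF : List Int → Int → Option Int
  | [], _ => none
  | m :: rest, target => if m ≥ target then some 0 else (pvF rest (target - m)).map (· + 1)

lemma pvGoA_eq_pvF (xs : List Int) (t : Int) : ∀ (c p : Int),
    pvGoA xs t c p = (pvF xs (t + 1 - p)).map (· + c) := by
  induction xs with
  | nil => intro c p; simp [pvGoA, pvF]
  | cons m rest ih =>
    intro c p
    simp only [pvGoA, pvF]
    by_cases h : p + m ≥ t + 1
    · rw [if_pos h, if_pos (by omega)]; simp
    · rw [if_neg h, if_neg (by omega), ih]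
      have : t + 1 - p - m = t + 1 - (p + m) := by ring
      rw [this, Option.map_map]
      cases pvF rest (t + 1 - (p + m)) with
      | none => simp
      | some v => simp; omega

lemma pvF_append (a b : List Int) : ∀ t : Int,
    pvF (a ++ b) t =
      match pvF a t with
      | some i => some i
      | none => (pvF b (t - a.sum)).map (fun r => (a.length : Int) + r) := by
  induction a with
  | nil =>
    intro t
    cases h : pvF b (t - List.sum []) <;> simp_all [pvF]
  | cons m a' ih =>
    intro t
    simp only [List.cons_append, pvF]
    by_cases h : m ≥ t
    · rw [if_pos h, if_pos h]
    · rw [if_neg h, if_neg h, ih]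
      cases hA : pvF a' (t - m) with
      | some i => simp
      | none =>
        simp only [Option.map_map]
        have e : t - m - a'.sum = t - (m + a'.sum) := by ring
        rw [e]
        cases hB : pvF b (t - (m + a'.sum)) with
        | none => simp [hB]
        | some r => simp [hB]; omega

lemma pvFirstReach_eq_pvF : ∀ (n : Nat) (ms : List Int), ms.length ≤ n → ∀ t : Int,
    pvFirstReach ms t = pvF ms t := by
  intro n
  induction n with
  | zero =>
    intro ms h t
    have : ms = [] := List.eq_nil_of_length_eq_zero (Nat.le_zero.mp h)
    subst this; simp [pvFirstReach, pvF]
  | succ n ih =>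
    intro ms h t
    match ms with
    | [] => simp [pvFirstReach, pvF]
    | [m] => simp [pvFirstReach, pvF]
    | m1 :: m2 :: rest =>
      rw [pvFirstReach]
      set xs := m1 :: m2 :: rest with hxs
      set mid := xs.length / 2 with hmid
      have hlen : xs.length = rest.length + 2 := by simp [hxs]
      have hmid1 : 1 ≤ mid := by omega
      have hmidlt : mid < xs.length := by omega
      have htk : (xs.take mid).length ≤ n := by simp; omega
      have hdr : (xs.drop mid).length ≤ n := by simp; omega
      rw [ih _ htk, ih _ hdr]
      have hsplit := pvF_append (xs.take mid) (xs.drop mid) t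
      rw [List.take_append_drop] at hsplit
      rw [hsplit]
      have hlentk : ((xs.take mid).length : Int) = (mid : Int) := by
        simp [List.length_take]; omega
      rw [hlentk]
      cases pvF (xs.take mid) t with
      | some i => simp
      | none =>
        cases pvF (xs.drop mid) (t - (xs.take mid).sum) <;> simp

-- ===== VERDICT (by name: the statement is the Claim_ definition above) =====
theorem get_machine_number_for_task_spec : Claim_equal_get_machine_number_for_task := by
  intro ind t _
  unfold Spec_get_machine_number_for_task get_machine_number_for_task get_machine_number_for_task_alt
  rw [pvGoA_eq_pvF, pvFirstReach_eq_pvF ind.2.length ind.2 le_rfl]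
  have e : t + 1 - 0 = t + 1 := by ring
  rw [e]
  cases hv : pvF ind.2 (t + 1) with
  | none => rfl
  | some v => simp
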